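-- pv_equiv track=rewrite | github.com/Aarogaming/Workbench | scripts/check_attestation_offline_wiring.py | check_workflow_content
-- ===== SOURCE A (Python) =====
-- OFFLINE_INPUT = "offline_bundle_path:"
--
-- PREFLIGHT_STEP = "Offline bundle preflight"
--
-- VERIFY_STEP = "Verify artifact attestations"
--
-- PREFLIGHT_IF = "if: ${{ github.event_name == 'workflow_dispatch' && inputs.offline_bundle_path != '' }}"
--
-- PREFLIGHT_TOKENS: tuple[str, ...] = (
--     '[ ! -f "${{ inputs.offline_bundle_path }}" ]',
--     "offline bundle file",
-- )
--
-- VERIFY_TOKENS: tuple[str, ...] = (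
--     "--bundle",
--     "inputs.offline_bundle_path",
--     '"${BUNDLE_ARGS[@]}"',
-- )
--
-- def _step_line_indexes(lines: list[str], step_name: str) -> list[int]:
--     needle = f"- name: {step_name}"
--     return [idx for idx, line in enumerate(lines) if line.strip() == needle]
--
-- def _step_blocks(lines: list[str], step_name: str) -> list[list[str]]:
--     indexes = _step_line_indexes(lines, step_name)
--     name_indexes = [
--         idx for idx, line in enumerate(lines) if line.lstrip().startswith("- name:")
--     ]
--     blocks: list[list[str]] = []
--     for idx in indexes:
--         next_indexes = [value for value in name_indexes if value > idx]
--         end = next_indexes[0] if next_indexes else len(lines)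
--         blocks.append(lines[idx:end])
--     return blocks
--
-- def check_workflow_content(content: str, workflow_label: str) -> list[str]:
--     issues: list[str] = []
--     lines = content.splitlines()
--
--     if OFFLINE_INPUT not in content:
--         issues.append(f"{workflow_label}: missing workflow_dispatch input '{OFFLINE_INPUT}'")
--
--     preflight_blocks = _step_blocks(lines, PREFLIGHT_STEP)
--     if not preflight_blocks:
--         issues.append(f"{workflow_label}: missing step '{PREFLIGHT_STEP}'")
--     else:
--         if not any(any(PREFLIGHT_IF in line for line in block) for block in preflight_blocks):
--             issues.append(f"{workflow_label}: step '{PREFLIGHT_STEP}' missing expected condition")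
--         for token in PREFLIGHT_TOKENS:
--             if not any(any(token in line for line in block) for block in preflight_blocks):
--                 issues.append(
--                     f"{workflow_label}: step '{PREFLIGHT_STEP}' missing expected token '{token}'"
--                 )
--
--     verify_blocks = _step_blocks(lines, VERIFY_STEP)
--     if not verify_blocks:
--         issues.append(f"{workflow_label}: missing step '{VERIFY_STEP}'")
--     else:
--         for token in VERIFY_TOKENS:
--             if not any(any(token in line for line in block) for block in verify_blocks):
--                 issues.append(
--                     f"{workflow_label}: step '{VERIFY_STEP}' missing expected token '{token}'"
--                 )
--
--     return issues
-- ===== SOURCE B (Python) =====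
-- OFFLINE_INPUT = "offline_bundle_path:"
--
-- PREFLIGHT_STEP = "Offline bundle preflight"
--
-- VERIFY_STEP = "Verify artifact attestations"
--
-- PREFLIGHT_IF = "if: ${{ github.event_name == 'workflow_dispatch' && inputs.offline_bundle_path != '' }}"
--
-- PREFLIGHT_TOKENS: tuple[str, ...] = (
--     '[ ! -f "${{ inputs.offline_bundle_path }}" ]',
--     "offline bundle file",
-- )
--
-- VERIFY_TOKENS: tuple[str, ...] = (
--     "--bundle",
--     "inputs.offline_bundle_path",
--     '"${BUNDLE_ARGS[@]}"',
-- )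
--
--
-- def _step_lines(lines: list[str], needle: str) -> list[str]:
--     """One forward pass: collect every line belonging to a block whose exact
--     stripped header equals `needle`; a block runs from its '- name:' header
--     up to (excluding) the next '- name:' boundary."""
--     selected: list[str] = []
--     inside = False
--     for line in lines:
--         if line.lstrip().startswith("- name:"):
--             inside = line.strip() == needle
--         if inside:
--             selected.append(line)
--     return selected
--
--
-- def check_workflow_content(content: str, workflow_label: str) -> list[str]:
--     issues: list[str] = []
--     lines = content.splitlines()
--
--     if OFFLINE_INPUT not in content:
--         issues.append(f"{workflow_label}: missing workflow_dispatch input '{OFFLINE_INPUT}'")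
--
--     pre = _step_lines(lines, f"- name: {PREFLIGHT_STEP}")
--     if not pre:
--         issues.append(f"{workflow_label}: missing step '{PREFLIGHT_STEP}'")
--     else:
--         if not any(PREFLIGHT_IF in line for line in pre):
--             issues.append(f"{workflow_label}: step '{PREFLIGHT_STEP}' missing expected condition")
--         issues += [
--             f"{workflow_label}: step '{PREFLIGHT_STEP}' missing expected token '{token}'"
--             for token in PREFLIGHT_TOKENS
--             if not any(token in line for line in pre)
--         ]
--
--     ver = _step_lines(lines, f"- name: {VERIFY_STEP}")
--     if not ver:
--         issues.append(f"{workflow_label}: missing step '{VERIFY_STEP}'")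
--     else:
--         issues += [
--             f"{workflow_label}: step '{VERIFY_STEP}' missing expected token '{token}'"
--             for token in VERIFY_TOKENS
--             if not any(token in line for line in ver)
--         ]
--
--     return issues
-- ===== Notes on version B (the rewrite author's own statement) =====
-- stated objective: simpler
-- what changed: Replaces the per-step index-list/slice machinery (_step_line_indexes + _step_blocks, which enumerate all name indexes, filter successors per match and slice out blocks) with a single forward scan per step that keeps an inside-the-matching-block flag and collects the block lines directly; the token checks then run over that flat line list.
import Mathlib
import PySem

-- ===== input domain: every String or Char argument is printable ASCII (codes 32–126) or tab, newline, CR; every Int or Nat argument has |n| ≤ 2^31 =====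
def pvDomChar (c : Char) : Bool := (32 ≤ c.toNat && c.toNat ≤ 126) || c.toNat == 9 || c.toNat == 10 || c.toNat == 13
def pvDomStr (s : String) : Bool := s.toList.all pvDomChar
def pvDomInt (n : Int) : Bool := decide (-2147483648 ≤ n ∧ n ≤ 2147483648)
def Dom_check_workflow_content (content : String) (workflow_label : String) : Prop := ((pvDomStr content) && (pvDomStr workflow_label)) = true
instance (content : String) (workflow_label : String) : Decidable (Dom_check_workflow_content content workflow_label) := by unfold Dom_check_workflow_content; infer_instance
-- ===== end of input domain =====

-- B replaces A's index-list/slice block machinery with a single flagged forward scan per step (objective: simpler).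

-- ===== PORT A =====
def pvOFFLINE_INPUT : String := "offline_bundle_path:"
def pvPREFLIGHT_STEP : String := "Offline bundle preflight"
def pvVERIFY_STEP : String := "Verify artifact attestations"
def pvPREFLIGHT_IF : String := "if: ${{ github.event_name == 'workflow_dispatch' && inputs.offline_bundle_path != '' }}"
def pvPREFLIGHT_TOKENS : List String := ["[ ! -f \"${{ inputs.offline_bundle_path }}\" ]", "offline bundle file"]
def pvVERIFY_TOKENS : List String := ["--bundle", "inputs.offline_bundle_path", "\"${BUNDLE_ARGS[@]}\""]

-- _step_line_indexes
def pvStepLineIndexes (lines : List String) (step_name : String) : List Int :=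
  let needle := "- name: " ++ step_name
  (PySem.List.enumerate lines).filterMap
    (fun p => if PySem.Str.strip p.2 == needle then some p.1 else none)

-- _step_blocks
def pvStepBlocks (lines : List String) (step_name : String) : List (List String) :=
  let indexes := pvStepLineIndexes lines step_name
  let name_indexes := (PySem.List.enumerate lines).filterMap
    (fun p => if PySem.Str.startswith (PySem.Str.lstrip p.2) "- name:" then some p.1 else none)
  indexes.foldl (fun blocks idx =>
    let next_indexes := name_indexes.filter (fun v => decide (idx < v))
    let e : Int := match next_indexes with
      | [] => (lines.length : Int)
      | v :: _ => v
    blocks ++ [PySem.List.slice lines (some idx) (some e)]) []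

def check_workflow_content (content : String) (workflow_label : String) : List String :=
  let issues : List String := []
  let lines := PySem.Str.splitlines content
  let issues := if !PySem.Str.isIn pvOFFLINE_INPUT content then
      issues ++ [workflow_label ++ ": missing workflow_dispatch input '" ++ pvOFFLINE_INPUT ++ "'"]
    else issues
  let preflight_blocks := pvStepBlocks lines pvPREFLIGHT_STEP
  let issues :=
    if preflight_blocks.isEmpty then
      issues ++ [workflow_label ++ ": missing step '" ++ pvPREFLIGHT_STEP ++ "'"]
    else
      let issues := if !(preflight_blocks.any fun block => block.any fun line => PySem.Str.isIn pvPREFLIGHT_IF line) then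
          issues ++ [workflow_label ++ ": step '" ++ pvPREFLIGHT_STEP ++ "' missing expected condition"]
        else issues
      pvPREFLIGHT_TOKENS.foldl (fun issues token =>
        if !(preflight_blocks.any fun block => block.any fun line => PySem.Str.isIn token line) then
          issues ++ [workflow_label ++ ": step '" ++ pvPREFLIGHT_STEP ++ "' missing expected token '" ++ token ++ "'"]
        else issues) issues
  let verify_blocks := pvStepBlocks lines pvVERIFY_STEP
  let issues :=
    if verify_blocks.isEmpty then
      issues ++ [workflow_label ++ ": missing step '" ++ pvVERIFY_STEP ++ "'"]
    else
      pvVERIFY_TOKENS.foldl (fun issues token =>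
        if !(verify_blocks.any fun block => block.any fun line => PySem.Str.isIn token line) then
          issues ++ [workflow_label ++ ": step '" ++ pvVERIFY_STEP ++ "' missing expected token '" ++ token ++ "'"]
        else issues) issues
  issues

-- ===== PORT B =====
-- _step_lines: one forward pass keeping an "inside the matching block" flag
def pvStepLines (lines : List String) (needle : String) : List String :=
  (lines.foldl (fun (st : List String × Bool) line =>
    let inside := if PySem.Str.startswith (PySem.Str.lstrip line) "- name:" then
        PySem.Str.strip line == needle
      else st.2
    ((if inside then st.1 ++ [line] else st.1), inside)) ([], false)).1

def check_workflow_content_alt (content : String) (workflow_label : String) : List String :=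
  let lines := PySem.Str.splitlines content
  let issues : List String :=
    if PySem.Str.isIn pvOFFLINE_INPUT content then []
    else [workflow_label ++ ": missing workflow_dispatch input '" ++ pvOFFLINE_INPUT ++ "'"]
  let pre := pvStepLines lines ("- name: " ++ pvPREFLIGHT_STEP)
  let issues :=
    if pre.isEmpty then
      issues ++ [workflow_label ++ ": missing step '" ++ pvPREFLIGHT_STEP ++ "'"]
    else
      let issues := if !(pre.any fun line => PySem.Str.isIn pvPREFLIGHT_IF line) then
          issues ++ [workflow_label ++ ": step '" ++ pvPREFLIGHT_STEP ++ "' missing expected condition"]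
        else issues
      issues ++ (pvPREFLIGHT_TOKENS.filter (fun token => !(pre.any fun line => PySem.Str.isIn token line))).map
        (fun token => workflow_label ++ ": step '" ++ pvPREFLIGHT_STEP ++ "' missing expected token '" ++ token ++ "'")
  let ver := pvStepLines lines ("- name: " ++ pvVERIFY_STEP)
  let issues :=
    if ver.isEmpty then
      issues ++ [workflow_label ++ ": missing step '" ++ pvVERIFY_STEP ++ "'"]
    else
      issues ++ (pvVERIFY_TOKENS.filter (fun token => !(ver.any fun line => PySem.Str.isIn token line))).map
        (fun token => workflow_label ++ ": step '" ++ pvVERIFY_STEP ++ "' missing expected token '" ++ token ++ "'")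
  issues

-- ===== PRECONDITION & SPEC =====
def Spec_check_workflow_content (content : String) (workflow_label : String) (out : List String) : Prop := out = check_workflow_content_alt content workflow_label
instance (content : String) (workflow_label : String) (out : List String) : Decidable (Spec_check_workflow_content content workflow_label out) := by unfold Spec_check_workflow_content; infer_instance

-- ===== CLAIM (what is proved, stated in full; the proofs are below) =====
def Claim_equal_check_workflow_content : Prop := ∀ (content : String) (workflow_label : String), Dom_check_workflow_content content workflow_label → Spec_check_workflow_content content workflow_label (check_workflow_content content workflow_label)

-- ===== LEMMAS AND PROOFS =====

def pvIsName (l : String) : Bool := PySem.Str.startswith (PySem.Str.lstrip l) "- name:"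
def pvIdxs (P : String → Bool) (lines : List String) (s : Int) : List Int :=
  (PySem.List.enumerate lines s).filterMap (fun p => if P p.2 then some p.1 else none)
theorem pvIdxs_nil (P : String → Bool) (s : Int) : pvIdxs P [] s = [] := rfl
theorem pvIdxs_cons (P : String → Bool) (l : String) (ls : List String) (s : Int) :
    pvIdxs P (l :: ls) s = (if P l then [s] else []) ++ pvIdxs P ls (s + 1) := by
  simp only [pvIdxs, PySem.List.enumerate_cons, List.filterMap_cons]
  split <;> simp_all
theorem pvIdxs_shift (P : String → Bool) (ls : List String) (s : Int) :
    pvIdxs P ls (s + 1) = (pvIdxs P ls s).map (· + 1) := by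
  induction ls generalizing s with
  | nil => rfl
  | cons l ls ih =>
    rw [pvIdxs_cons, pvIdxs_cons, ih (s + 1)]
    split <;> simp
theorem pvIdxs_mem_bounds (P : String → Bool) (ls : List String) (s j : Int)
    (h : j ∈ pvIdxs P ls s) : s ≤ j ∧ j < s + ls.length := by
  induction ls generalizing s with
  | nil => simp [pvIdxs_nil] at h
  | cons l ls ih =>
    rw [pvIdxs_cons] at h
    rcases List.mem_append.1 h with h1 | h2
    · split at h1
      · simp at h1; subst h1; simp only [List.length_cons]; omega
      · simp at h1
    · have := ih (s + 1) h2
      simp only [List.length_cons]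
      omega
theorem pvTake_head_nameIdx (ls : List String) :
    List.take (match pvIdxs pvIsName ls 0 with
               | [] => ls.length
               | v :: _ => v.toNat) ls
      = ls.takeWhile (fun x => !pvIsName x) := by
  induction ls with
  | nil => simp
  | cons l ls ih =>
    rw [pvIdxs_cons]
    by_cases hn : pvIsName l
    · simp [hn]
    · simp only [hn, if_neg, Bool.false_eq_true, not_false_iff, List.nil_append]
      rw [pvIdxs_shift]
      cases hX : pvIdxs pvIsName ls 0 with
      | nil =>
        rw [hX] at ih
        have ih' : ls = List.takeWhile (fun x => !pvIsName x) ls := by simpa using ih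
        simp only [List.map_nil, List.take_length]
        rw [List.takeWhile_cons]
        simp [hn, ← ih']
      | cons v vs =>
        have hv : 0 ≤ v := (pvIdxs_mem_bounds _ _ _ _ (by rw [hX]; exact List.mem_cons_self ..)).1
        rw [hX] at ih
        simp only [List.map_cons]
        have h2 : (v + 1).toNat = v.toNat + 1 := by omega
        rw [h2]
        have ih' : List.take v.toNat ls = List.takeWhile (fun x => !pvIsName x) ls := by simpa using ih
        rw [List.take_succ_cons, List.takeWhile_cons]
        simp [hn, ih']

theorem pvSlice_cons_succ {α : Type} (l : α) (ls : List α) (a b : Int)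
    (ha : 0 ≤ a) (hb : 0 ≤ b) :
    PySem.List.slice (l :: ls) (some (a + 1)) (some (b + 1))
      = PySem.List.slice ls (some a) (some b) := by
  simp only [PySem.List.slice, PySem.List.clampIdx, List.length_cons]
  have h1 : ¬(a + 1 < 0) := by omega
  have h2 : ¬(b + 1 < 0) := by omega
  have h3 : ¬(a < 0) := by omega
  have h4 : ¬(b < 0) := by omega
  simp only [h1, h2, h3, h4, if_false]
  have ha' : (a + 1).toNat = a.toNat + 1 := by omega
  have hb' : (b + 1).toNat = b.toNat + 1 := by omega
  rw [ha', hb']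
  have hA : min (a.toNat + 1) (ls.length + 1) = min a.toNat ls.length + 1 := by omega
  have hB : min (b.toNat + 1) (ls.length + 1) = min b.toNat ls.length + 1 := by omega
  rw [hA, hB]
  have : min b.toNat ls.length + 1 - (min a.toNat ls.length + 1)
      = min b.toNat ls.length - min a.toNat ls.length := by omega
  rw [this, List.drop_succ_cons]

theorem pvSlice_zero_succ {α : Type} (l : α) (ls : List α) (b : Int) (hb : 0 ≤ b) :
    PySem.List.slice (l :: ls) (some 0) (some (b + 1))
      = l :: PySem.List.slice ls (some 0) (some b) := by
  simp only [PySem.List.slice, PySem.List.clampIdx, List.length_cons]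
  have h2 : ¬(b + 1 < 0) := by omega
  have h4 : ¬(b < 0) := by omega
  have h0 : ¬((0:Int) < 0) := by omega
  simp only [h2, h4, h0, if_false]
  have hb' : (b + 1).toNat = b.toNat + 1 := by omega
  rw [hb']
  have hB : min (b.toNat + 1) (ls.length + 1) = min b.toNat ls.length + 1 := by omega
  rw [hB]
  simp [List.take_succ_cons]

theorem pvSlice_zero {α : Type} (ls : List α) (b : Int) (hb : 0 ≤ b) :
    PySem.List.slice ls (some 0) (some b) = List.take b.toNat ls := by
  simp only [PySem.List.slice, PySem.List.clampIdx]
  have h4 : ¬(b < 0) := by omega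
  have h0 : ¬((0:Int) < 0) := by omega
  simp only [h4, h0, if_false]
  simp

def pvEndOf (lines : List String) (idx : Int) : Int :=
  match (pvIdxs pvIsName lines 0).filter (fun v => decide (idx < v)) with
  | [] => (lines.length : Int)
  | v :: _ => v

def pvBlockAt (lines : List String) (idx : Int) : List String :=
  PySem.List.slice lines (some idx) (some (pvEndOf lines idx))

def pvSegs (needle : String) : List String → List (List String)
  | [] => []
  | l :: ls =>
    (if PySem.Str.strip l == needle then [l :: ls.takeWhile (fun x => !pvIsName x)] else [])
      ++ pvSegs needle ls

theorem pvEndOf_cons_succ (l : String) (ls : List String) (j : Int) (hj : 0 ≤ j) :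
    pvEndOf (l :: ls) (j + 1) = pvEndOf ls j + 1 := by
  unfold pvEndOf
  rw [pvIdxs_cons, pvIdxs_shift]
  rw [List.filter_append, List.filter_map]
  have h0 : List.filter (fun v => decide (j + 1 < v)) (if pvIsName l then [(0:Int)] else []) = [] := by
    split
    · simp; omega
    · rfl
  rw [h0, List.nil_append]
  have hfun : ((fun v => decide (j + 1 < v)) ∘ (· + 1)) = (fun v : Int => decide (j < v)) := by
    funext v; simp only [Function.comp_apply, decide_eq_decide]; omega
  rw [hfun]
  cases hY : List.filter (fun v => decide (j < v)) (pvIdxs pvIsName ls 0) with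
  | nil => simp
  | cons v vs => simp

theorem pvEndOf_nonneg (ls : List String) (j : Int) (hj : 0 ≤ j) : 0 ≤ pvEndOf ls j := by
  unfold pvEndOf
  cases hY : List.filter (fun v => decide (j < v)) (pvIdxs pvIsName ls 0) with
  | nil => simp
  | cons v vs =>
    have hmem : v ∈ List.filter (fun v => decide (j < v)) (pvIdxs pvIsName ls 0) := by
      rw [hY]; exact List.mem_cons_self ..
    have hv := List.of_mem_filter hmem
    simp at hv
    simp
    omega

theorem pvBlockAt_cons_succ (l : String) (ls : List String) (j : Int) (hj : 0 ≤ j) :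
    pvBlockAt (l :: ls) (j + 1) = pvBlockAt ls j := by
  unfold pvBlockAt
  rw [pvEndOf_cons_succ l ls j hj]
  exact pvSlice_cons_succ l ls j (pvEndOf ls j) hj (pvEndOf_nonneg ls j hj)

theorem pvBlockAt_zero (l : String) (ls : List String) :
    pvBlockAt (l :: ls) 0 = l :: ls.takeWhile (fun x => !pvIsName x) := by
  unfold pvBlockAt pvEndOf
  rw [pvIdxs_cons, pvIdxs_shift]
  rw [List.filter_append, List.filter_map]
  have h0 : List.filter (fun v => decide ((0:Int) < v)) (if pvIsName l then [(0:Int)] else []) = [] := by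
    split <;> simp
  rw [h0, List.nil_append]
  have hself : List.filter ((fun v => decide ((0:Int) < v)) ∘ (· + 1)) (pvIdxs pvIsName ls 0)
      = pvIdxs pvIsName ls 0 := by
    apply List.filter_eq_self.2
    intro v hv
    have := (pvIdxs_mem_bounds _ _ _ _ hv).1
    simp; omega
  rw [hself]
  cases hY : pvIdxs pvIsName ls 0 with
  | nil =>
    simp only [List.map_nil, List.length_cons]
    have : ((ls.length + 1 : Nat) : Int) = (ls.length : Int) + 1 := by push_cast; ring
    rw [this, pvSlice_zero_succ l ls _ (by positivity)]
    rw [pvSlice_zero ls _ (by positivity)]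
    have := pvTake_head_nameIdx ls
    rw [hY] at this
    simpa using this
  | cons v vs =>
    have hv : 0 ≤ v := (pvIdxs_mem_bounds _ _ _ _ (by rw [hY]; exact List.mem_cons_self ..)).1
    simp only [List.map_cons]
    rw [show v + 1 = v + 1 from rfl, pvSlice_zero_succ l ls v hv, pvSlice_zero ls v hv]
    have := pvTake_head_nameIdx ls
    rw [hY] at this
    simpa using this

theorem pvBlocks_eq_segs (needle : String) (ls : List String) :
    (pvIdxs (fun x => PySem.Str.strip x == needle) ls 0).map (pvBlockAt ls)
      = pvSegs needle ls := by
  induction ls with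
  | nil => rfl
  | cons l ls ih =>
    rw [pvIdxs_cons, pvIdxs_shift, List.map_append, List.map_map]
    have htail : List.map (pvBlockAt (l :: ls) ∘ (· + 1)) (pvIdxs (fun x => PySem.Str.strip x == needle) ls 0)
        = List.map (pvBlockAt ls) (pvIdxs (fun x => PySem.Str.strip x == needle) ls 0) := by
      apply List.map_congr_left
      intro j hj
      have hjb := (pvIdxs_mem_bounds _ _ _ _ hj).1
      exact pvBlockAt_cons_succ l ls j hjb
    rw [htail, ih]
    have hseg : pvSegs needle (l :: ls)
        = (if PySem.Str.strip l == needle then [l :: ls.takeWhile (fun x => !pvIsName x)] else [])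
            ++ pvSegs needle ls := rfl
    rw [hseg]
    split
    · simp [pvBlockAt_zero]
    · simp

theorem pvStepBlocks_eq_segs (lines : List String) (sn : String) :
    pvStepBlocks lines sn = pvSegs ("- name: " ++ sn) lines := by
  rw [← pvBlocks_eq_segs]
  show List.foldl (fun blocks idx => blocks ++ [pvBlockAt lines idx]) []
      (pvIdxs (fun x => PySem.Str.strip x == ("- name: " ++ sn)) lines 0) = _
  rw [PySem.List.foldl_append_singleton_eq_map]
  simp

theorem pvMatch_isName (sn l : String)
    (h : (PySem.Str.strip l == ("- name: " ++ sn)) = true) : pvIsName l = true := by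
  have he : PySem.Str.strip l = "- name: " ++ sn := by simpa using h
  have hc : PySem.Chars.strip l.toList = ("- name: " ++ sn).toList := by
    rw [← PySem.Str.toList_strip, he]
  unfold pvIsName
  rw [PySem.Str.startswith_eq, PySem.Str.toList_lstrip]
  rw [PySem.Chars.startswith_iff]
  have h1 : "- name:".toList <+: ("- name: " ++ sn).toList := by
    rw [String.toList_append]
    refine List.IsPrefix.trans ?_ (List.prefix_append _ _)
    decide
  rw [← hc] at h1
  have h2 : PySem.Chars.strip l.toList <+: PySem.Chars.lstrip l.toList := by
    unfold PySem.Chars.strip PySem.Chars.rstrip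
    have := List.reverse_prefix.2
      (List.dropWhile_suffix (l := (PySem.Chars.lstrip l.toList).reverse) PySem.Chars.isspace)
    simpa using this
  exact h1.trans h2

theorem pvSegs_dropWhile (sn : String) (ls : List String) :
    pvSegs ("- name: " ++ sn) (ls.dropWhile (fun x => !pvIsName x))
      = pvSegs ("- name: " ++ sn) ls := by
  induction ls with
  | nil => rfl
  | cons l ls ih =>
    rw [List.dropWhile_cons]
    by_cases hn : pvIsName l
    · simp [hn]
    · have hm : ¬(PySem.Str.strip l == ("- name: " ++ sn)) = true := fun hc => hn (pvMatch_isName sn l hc)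
      simp only [hn, Bool.not_false, if_pos]
      rw [ih]
      have hseg : pvSegs ("- name: " ++ sn) (l :: ls)
          = (if PySem.Str.strip l == ("- name: " ++ sn) then [l :: ls.takeWhile (fun x => !pvIsName x)] else [])
              ++ pvSegs ("- name: " ++ sn) ls := rfl
      rw [hseg, if_neg hm, List.nil_append]

def pvG (needle : String) : Bool → List String → List String
  | _, [] => []
  | i, l :: ls =>
    let i' := if pvIsName l then PySem.Str.strip l == needle else i
    (if i' then [l] else []) ++ pvG needle i' ls

theorem pvG_spec (sn : String) (i : Bool) (ls : List String) :
    pvG ("- name: " ++ sn) i ls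
      = (if i then ls.takeWhile (fun x => !pvIsName x) else [])
          ++ (pvSegs ("- name: " ++ sn) (ls.dropWhile (fun x => !pvIsName x))).flatten := by
  induction ls generalizing i with
  | nil => cases i <;> rfl
  | cons l ls ih =>
    have hG : pvG ("- name: " ++ sn) i (l :: ls)
        = (if (if pvIsName l then PySem.Str.strip l == ("- name: " ++ sn) else i) then [l] else [])
            ++ pvG ("- name: " ++ sn) (if pvIsName l then PySem.Str.strip l == ("- name: " ++ sn) else i) ls := rfl
    rw [hG, List.takeWhile_cons, List.dropWhile_cons]
    by_cases hn : pvIsName l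
    · simp only [hn, if_pos, Bool.not_true, Bool.false_eq_true, if_neg, not_false_iff]
      have hseg : pvSegs ("- name: " ++ sn) (l :: ls)
          = (if PySem.Str.strip l == ("- name: " ++ sn) then [l :: ls.takeWhile (fun x => !pvIsName x)] else [])
              ++ pvSegs ("- name: " ++ sn) ls := rfl
      by_cases hm : (PySem.Str.strip l == ("- name: " ++ sn)) = true
      · simp only [hm, if_pos, hseg, List.flatten_append]
        rw [ih true]
        simp only [if_pos, List.flatten_cons]
        rw [pvSegs_dropWhile]
        simp
      · simp only [hm, if_neg, Bool.false_eq_true, not_false_iff, hseg, List.nil_append]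
        rw [ih false]
        simp [pvSegs_dropWhile]
    · simp only [hn, Bool.false_eq_true, if_neg, not_false_iff, Bool.not_false, if_pos]
      rw [ih i]
      cases i <;> simp

theorem pvFoldl_g (needle : String) (ls : List String) (acc : List String) (i : Bool) :
    (ls.foldl (fun (st : List String × Bool) line =>
      let inside := if PySem.Str.startswith (PySem.Str.lstrip line) "- name:" then
          PySem.Str.strip line == needle
        else st.2
      ((if inside then st.1 ++ [line] else st.1), inside)) (acc, i)).1
      = acc ++ pvG needle i ls := by
  induction ls generalizing acc i with
  | nil => simp [pvG]
  | cons l ls ih =>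
    rw [List.foldl_cons]
    have hG : pvG needle i (l :: ls)
        = (if (if pvIsName l then PySem.Str.strip l == needle else i) then [l] else [])
            ++ pvG needle (if pvIsName l then PySem.Str.strip l == needle else i) ls := rfl
    rw [hG]
    show (List.foldl _ ((if (if pvIsName l then PySem.Str.strip l == needle else i) then acc ++ [l] else acc),
        (if pvIsName l then PySem.Str.strip l == needle else i)) ls).1 = _
    rw [ih]
    by_cases hn : (if pvIsName l then PySem.Str.strip l == needle else i) = true
    · simp [hn]
    · simp [hn]

theorem pvStepLines_eq_flatten (lines : List String) (sn : String) :
    pvStepLines lines ("- name: " ++ sn) = (pvStepBlocks lines sn).flatten := by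
  unfold pvStepLines
  rw [pvFoldl_g, List.nil_append, pvG_spec]
  rw [pvSegs_dropWhile, pvStepBlocks_eq_segs]
  simp

theorem pvSegs_ne_nil (needle : String) (ls : List String) :
    ∀ b ∈ pvSegs needle ls, b ≠ [] := by
  induction ls with
  | nil => simp [pvSegs]
  | cons l ls ih =>
    have hseg : pvSegs needle (l :: ls)
        = (if PySem.Str.strip l == needle then [l :: ls.takeWhile (fun x => !pvIsName x)] else [])
            ++ pvSegs needle ls := rfl
    rw [hseg]
    intro b hb
    rcases List.mem_append.1 hb with h1 | h2
    · split at h1 <;> simp at h1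
      subst h1; simp
    · exact ih b h2

theorem pvIsEmpty_eq (lines : List String) (sn : String) :
    (pvStepLines lines ("- name: " ++ sn)).isEmpty = (pvStepBlocks lines sn).isEmpty := by
  rw [pvStepLines_eq_flatten]
  rcases hE : (pvStepBlocks lines sn).isEmpty with _ | _
  · rw [List.isEmpty_eq_false_iff] at hE ⊢
    intro hflat
    rw [List.flatten_eq_nil_iff] at hflat
    rcases List.exists_mem_of_ne_nil _ hE with ⟨b, hb⟩
    have hb' : b ≠ [] := by
      rw [pvStepBlocks_eq_segs] at hb
      exact pvSegs_ne_nil _ _ b hb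
    exact hb' (hflat b hb)
  · rw [List.isEmpty_iff] at hE ⊢
    rw [hE]; rfl

theorem pvAny_eq (lines : List String) (sn : String) (p : String → Bool) :
    (pvStepBlocks lines sn).any (fun block => block.any p)
      = (pvStepLines lines ("- name: " ++ sn)).any p := by
  rw [pvStepLines_eq_flatten, List.any_flatten]

theorem pvMain (c w : String) : check_workflow_content c w = check_workflow_content_alt c w := by
  unfold check_workflow_content check_workflow_content_alt
  simp only [pvIsEmpty_eq, pvAny_eq, PySem.List.foldl_append_if]
  cases hIn : PySem.Str.isIn pvOFFLINE_INPUT c <;> simp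

-- ===== VERDICT (by name: the statement is the Claim_ definition above) =====
theorem check_workflow_content_spec : Claim_equal_check_workflow_content := by
  intro c w _
  unfold Spec_check_workflow_content
  exact pvMain c w
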